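-- pv_equiv track=rewrite | github.com/shaunmalti/WordClustering | Clustering.py | TruePositives
-- ===== SOURCE A (Python) =====
-- import operator as op
-- import functools
--
-- def ncr(n, r):
--     r = min(r, n - r)
--     numer = functools.reduce(op.mul, range(n, n - r, -1), 1)
--     denom = functools.reduce(op.mul, range(1, r + 1), 1)
--     return numer // denom
--
-- def TruePositives(data_length,k):
--     vals = []
--     for i in range(0,len(data_length)):
--         vals.append([sum(1 for x in data_length[i] if x[0] == 1),
--                     sum(1 for x in data_length[i] if x[0] == 2),
--                     sum(1 for x in data_length[i] if x[0] == 3),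
--                     sum(1 for x in data_length[i] if x[0] == 4)])
--     comb_vals = []
--     for i in range(0,len(vals)):
--         for j in range(0,len(vals[i])):
--             if vals[i][j] >= 2:
--                 comb_vals.append(ncr(vals[i][j],2))
--     return sum(comb_vals)
-- ===== SOURCE B (Python) =====
-- def TruePositives(data_length, k):
--     # Online pair counting: each new item forms one agreeing pair with every
--     # earlier same-label item in its cluster; summing those increments gives
--     # sum_l C(count_l, 2) without ever computing counts-then-combinations.
--     total = 0
--     for cluster in data_length:
--         seen = {}
--         for x in cluster:
--             lbl = x[0]
--             if 1 <= lbl <= 4: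
--                 c = seen.get(lbl, 0)
--                 total += c
--                 seen[lbl] = c + 1
--     return total
-- ===== Notes on version B (the rewrite author's own statement) =====
-- stated objective: alternative
-- what changed: B counts agreeing pairs online: in one streaming pass per cluster each item adds the number of previously seen same-label items (labels 1-4), so no per-label counts, no combination function and no intermediate lists are ever built, replacing A's count-then-ncr two-stage scheme.
import Mathlib
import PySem

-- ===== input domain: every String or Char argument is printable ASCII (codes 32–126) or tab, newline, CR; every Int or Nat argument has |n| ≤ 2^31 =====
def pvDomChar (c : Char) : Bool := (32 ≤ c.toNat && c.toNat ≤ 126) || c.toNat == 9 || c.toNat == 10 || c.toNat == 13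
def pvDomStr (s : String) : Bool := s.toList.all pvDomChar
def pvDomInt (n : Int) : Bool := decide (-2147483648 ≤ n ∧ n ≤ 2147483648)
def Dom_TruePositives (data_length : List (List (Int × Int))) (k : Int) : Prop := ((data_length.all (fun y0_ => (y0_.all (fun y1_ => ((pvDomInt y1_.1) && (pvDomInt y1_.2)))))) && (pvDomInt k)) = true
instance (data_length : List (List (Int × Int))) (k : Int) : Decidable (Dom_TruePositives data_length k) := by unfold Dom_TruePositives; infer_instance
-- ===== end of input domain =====

-- B counts agreeing pairs online (each item adds the number of earlier same-label
-- items in its cluster) instead of A's count-per-label-then-ncr scheme (objective: alternative).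

-- ===== PORT A =====
def ncr (n r0 : Int) : Int :=
  let r := min r0 (n - r0)
  let numer := (PySem.List.pyRange n (n - r) (-1)).foldl (fun a b => a * b) 1
  let denom := (PySem.List.pyRange 1 (r + 1) 1).foldl (fun a b => a * b) 1
  PySem.Int.floordiv numer denom

def TruePositives (data_length : List (List (Int × Int))) (k : Int) : Int :=
  let vals : List (List Int) :=
    (PySem.List.pyRange 0 (data_length.length : Int) 1).foldl
      (fun acc i =>
        let c := PySem.List.pyGetD data_length i []
        acc ++ [[((c.filter (fun x => x.1 == 1)).map (fun _ => (1 : Int))).sum,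
                 ((c.filter (fun x => x.1 == 2)).map (fun _ => (1 : Int))).sum,
                 ((c.filter (fun x => x.1 == 3)).map (fun _ => (1 : Int))).sum,
                 ((c.filter (fun x => x.1 == 4)).map (fun _ => (1 : Int))).sum]]) []
  let comb_vals : List Int :=
    (PySem.List.pyRange 0 (vals.length : Int) 1).foldl
      (fun acc i =>
        let row := PySem.List.pyGetD vals i []
        (PySem.List.pyRange 0 (row.length : Int) 1).foldl
          (fun acc2 j =>
            let v := PySem.List.pyGetD row j 0
            if v ≥ 2 then acc2 ++ [ncr v 2] else acc2) acc) []
  comb_vals.sum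

-- ===== PORT B =====
-- B's loop body: on a (seen-counts, total) state, an in-range label adds the count
-- of earlier same-label items and bumps its count
def pvStep (st : PySem.Dict Int Int × Int) (x : Int × Int) : PySem.Dict Int Int × Int :=
  let lbl := x.1
  if 1 ≤ lbl ∧ lbl ≤ 4 then
    let c := st.1.getD lbl 0
    (st.1.insert lbl (c + 1), st.2 + c)
  else st

def TruePositives_alt (data_length : List (List (Int × Int))) (k : Int) : Int :=
  data_length.foldl
    (fun total cluster =>
      (cluster.foldl pvStep ((PySem.Dict.empty : PySem.Dict Int Int), total)).2) 0

-- ===== PRECONDITION & SPEC =====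
def Spec_TruePositives (data_length : List (List (Int × Int))) (k : Int) (out : Int) : Prop := out = TruePositives_alt data_length k
instance (data_length : List (List (Int × Int))) (k : Int) (out : Int) : Decidable (Spec_TruePositives data_length k out) := by unfold Spec_TruePositives; infer_instance

-- ===== CLAIM (what is proved, stated in full; the proofs are below) =====
def Claim_equal_TruePositives : Prop := ∀ (data_length : List (List (Int × Int))) (k : Int), Dom_TruePositives data_length k → Spec_TruePositives data_length k (TruePositives data_length k)

-- ===== LEMMAS AND PROOFS =====

-- C(n,2) as Python computes it
def pvComb2 (n : Int) : Int := PySem.Int.floordiv (n * (n - 1)) 2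

-- per-cluster score both programs compute: sum over labels 1..4 of C(count_l, 2)
def clusterScore (c : List (Int × Int)) : Int :=
  (([1, 2, 3, 4] : List Int).map (fun l =>
    pvComb2 (c.countP (fun x => x.1 == l) : Int))).sum

-- the closed form equals A's guarded ncr call, for 0 <= n
lemma ncr_two (n : Int) (hn : 0 ≤ n) :
    (if n ≥ 2 then ncr n 2 else 0) = pvComb2 n := by
  unfold pvComb2
  rcases (by omega : n = 0 ∨ n = 1 ∨ n = 2 ∨ n = 3 ∨ 4 ≤ n) with h | h | h | h | h
  · subst h; decide
  · subst h; decide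
  · subst h; decide
  · subst h; decide
  · have h2 : n ≥ 2 := by omega
    simp only [if_pos h2, ncr]
    have hr : min (2 : Int) (n - 2) = 2 := by omega
    rw [hr]
    have hnum : PySem.List.pyRange n (n - 2) (-1) = [n, n - 1] := by
      rw [PySem.List.pyRange_neg_one_cons (by omega),
          PySem.List.pyRange_neg_one_cons (by omega),
          PySem.List.pyRange_neg_one_eq_nil (by omega)]
    have hden : PySem.List.pyRange 1 (2 + 1) 1 = [1, 2] := by decide
    simp only [hnum, hden, List.foldl]
    norm_num

lemma pvSumMapOne {α : Type} (l : List α) :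
    (l.map (fun _ => (1 : Int))).sum = (l.length : Int) := by
  induction l with
  | nil => simp
  | cons x xs ih => simp; ring

-- A's index loop appending one row per cluster is a map
lemma pvValsEq (d : List (List (Int × Int))) (R : List (Int × Int) → List Int) :
    (PySem.List.pyRange 0 (d.length : Int) 1).foldl
        (fun acc i => acc ++ [R (PySem.List.pyGetD d i [])]) []
      = d.map R := by
  have hl : (d.length : Int) = PySem.List.len d := rfl
  rw [hl, ← List.foldl_map (f := fun i => PySem.List.pyGetD d i [])
        (g := fun (acc : List (List Int)) c => acc ++ [R c]),
      PySem.List.map_pyGetD_pyRange_zero,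
      PySem.List.foldl_append_singleton_eq_map, List.nil_append]

-- A's guarded append loop over one row, summed
lemma pvRowFoldSum (f : Int → Int) (l : List Int) (acc : List Int) :
    (l.foldl (fun a v => if v ≥ 2 then a ++ [f v] else a) acc).sum
      = acc.sum + (l.map (fun v => if v ≥ 2 then f v else 0)).sum := by
  induction l generalizing acc with
  | nil => simp
  | cons x xs ih =>
    simp only [List.foldl_cons, List.map_cons, List.sum_cons]
    split_ifs with h
    · rw [ih]; simp; ring
    · rw [ih]; ring

lemma pvInnerSum (row : List Int) (acc : List Int) :
    ((PySem.List.pyRange 0 (row.length : Int) 1).foldl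
       (fun acc2 j =>
          if PySem.List.pyGetD row j 0 ≥ 2
          then acc2 ++ [ncr (PySem.List.pyGetD row j 0) 2] else acc2) acc).sum
      = acc.sum + (row.map (fun v => if v ≥ 2 then ncr v 2 else 0)).sum := by
  have hl : (row.length : Int) = PySem.List.len row := rfl
  rw [hl, ← List.foldl_map (f := fun j => PySem.List.pyGetD row j 0)
        (g := fun (a : List Int) v => if v ≥ 2 then a ++ [ncr v 2] else a),
      PySem.List.map_pyGetD_pyRange_zero]
  exact pvRowFoldSum _ row acc

-- A's double index loop collecting the combination counts, summed
lemma pvCombSum (vals : List (List Int)) :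
    ((PySem.List.pyRange 0 (vals.length : Int) 1).foldl
       (fun acc i =>
          (PySem.List.pyRange 0 ((PySem.List.pyGetD vals i ([] : List Int)).length : Int) 1).foldl
            (fun acc2 j =>
               if PySem.List.pyGetD (PySem.List.pyGetD vals i []) j 0 ≥ 2
               then acc2 ++ [ncr (PySem.List.pyGetD (PySem.List.pyGetD vals i []) j 0) 2]
               else acc2) acc) ([] : List Int)).sum
      = (vals.map (fun row => (row.map (fun v => if v ≥ 2 then ncr v 2 else 0)).sum)).sum := by
  have hl : (vals.length : Int) = PySem.List.len vals := rfl
  rw [hl, ← List.foldl_map (f := fun i => PySem.List.pyGetD vals i ([] : List Int))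
        (g := fun (acc : List Int) row =>
          (PySem.List.pyRange 0 (row.length : Int) 1).foldl
            (fun acc2 j =>
               if PySem.List.pyGetD row j 0 ≥ 2
               then acc2 ++ [ncr (PySem.List.pyGetD row j 0) 2] else acc2) acc),
      PySem.List.map_pyGetD_pyRange_zero]
  clear hl
  induction vals using List.reverseRecOn with
  | nil => simp
  | append_singleton rs r ih =>
    rw [List.foldl_append, List.map_append, List.sum_append]
    simp only [List.foldl_cons, List.foldl_nil]
    rw [pvInnerSum, ih]
    simp

-- one row of A's vals, summed with the guard, is the cluster score
lemma pvRowSum (c : List (Int × Int)) :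
    (([((c.filter (fun x => x.1 == 1)).map (fun _ => (1 : Int))).sum,
        ((c.filter (fun x => x.1 == 2)).map (fun _ => (1 : Int))).sum,
        ((c.filter (fun x => x.1 == 3)).map (fun _ => (1 : Int))).sum,
        ((c.filter (fun x => x.1 == 4)).map (fun _ => (1 : Int))).sum] : List Int).map
         (fun v => if v ≥ 2 then ncr v 2 else 0)).sum
      = clusterScore c := by
  have hcnt : ∀ l : Int,
      ((c.filter (fun x => x.1 == l)).map (fun _ => (1 : Int))).sum
        = (c.countP (fun x => x.1 == l) : Int) := by
    intro l; rw [pvSumMapOne, List.countP_eq_length_filter]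
  have h4 : ∀ l : Int,
      (if ((c.countP (fun x => x.1 == l) : Int)) ≥ 2
        then ncr ((c.countP (fun x => x.1 == l) : Int)) 2 else 0)
        = pvComb2 ((c.countP (fun x => x.1 == l) : Int)) :=
    fun l => ncr_two _ (by positivity)
  simp only [List.map_cons, List.map_nil, List.sum_cons, List.sum_nil, hcnt]
  rw [h4 1, h4 2, h4 3, h4 4]
  simp only [clusterScore, List.map_cons, List.map_nil, List.sum_cons, List.sum_nil]

-- A equals the mapped cluster scores
lemma portA_eq (d : List (List (Int × Int))) (k : Int) :
    TruePositives d k = (d.map clusterScore).sum := by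
  simp only [TruePositives]
  rw [pvValsEq d (fun c =>
        [((c.filter (fun x => x.1 == 1)).map (fun _ => (1 : Int))).sum,
         ((c.filter (fun x => x.1 == 2)).map (fun _ => (1 : Int))).sum,
         ((c.filter (fun x => x.1 == 3)).map (fun _ => (1 : Int))).sum,
         ((c.filter (fun x => x.1 == 4)).map (fun _ => (1 : Int))).sum]),
      pvCombSum]
  simp only [List.map_map, Function.comp_def, pvRowSum]

-- triangular increment: C(n+1,2) = C(n,2) + n
lemma pvComb2_succ (n : Int) : pvComb2 (n + 1) = pvComb2 n + n := by
  unfold pvComb2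
  rw [PySem.Int.floordiv_eq_ediv_of_pos (by omega), PySem.Int.floordiv_eq_ediv_of_pos (by omega)]
  rw [show (n + 1) * (n + 1 - 1) = n * (n - 1) + n * 2 by ring,
      Int.add_mul_ediv_right _ _ (by omega)]

-- adding one element to a cluster raises its score by the prior same-label count
lemma clusterScore_append (c : List (Int × Int)) (x : Int × Int) :
    clusterScore (c ++ [x])
      = clusterScore c
        + (if 1 ≤ x.1 ∧ x.1 ≤ 4 then (c.countP (fun y => y.1 == x.1) : Int) else 0) := by
  have hcnt : ∀ l : Int,
      ((c ++ [x]).countP (fun y => y.1 == l) : Int)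
        = (c.countP (fun y => y.1 == l) : Int) + (if x.1 = l then 1 else 0) := by
    intro l
    rw [List.countP_append]
    simp only [List.countP_cons, List.countP_nil]
    by_cases h : x.1 = l <;> simp [h]
  simp only [clusterScore, List.map_cons, List.map_nil, List.sum_cons, List.sum_nil, hcnt]
  by_cases h1 : x.1 = 1
  · simp only [h1, if_pos rfl, if_neg (by norm_num : ¬ (1:Int) = 2),
      if_neg (by norm_num : ¬ (1:Int) = 3), if_neg (by norm_num : ¬ (1:Int) = 4),
      if_pos (by norm_num : (1:Int) ≤ 1 ∧ (1:Int) ≤ 4), if_true, add_zero, pvComb2_succ]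
    ring
  by_cases h2 : x.1 = 2
  · simp only [h2, if_pos rfl, if_neg (by norm_num : ¬ (2:Int) = 1),
      if_neg (by norm_num : ¬ (2:Int) = 3), if_neg (by norm_num : ¬ (2:Int) = 4),
      if_pos (by norm_num : (1:Int) ≤ 2 ∧ (2:Int) ≤ 4), if_true, add_zero, pvComb2_succ]
    ring
  by_cases h3 : x.1 = 3
  · simp only [h3, if_pos rfl, if_neg (by norm_num : ¬ (3:Int) = 1),
      if_neg (by norm_num : ¬ (3:Int) = 2), if_neg (by norm_num : ¬ (3:Int) = 4),
      if_pos (by norm_num : (1:Int) ≤ 3 ∧ (3:Int) ≤ 4), if_true, add_zero, pvComb2_succ]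
    ring
  by_cases h4 : x.1 = 4
  · simp only [h4, if_pos rfl, if_neg (by norm_num : ¬ (4:Int) = 1),
      if_neg (by norm_num : ¬ (4:Int) = 2), if_neg (by norm_num : ¬ (4:Int) = 3),
      if_pos (by norm_num : (1:Int) ≤ 4 ∧ (4:Int) ≤ 4), if_true, add_zero, pvComb2_succ]
    ring
  · have hr : ¬ (1 ≤ x.1 ∧ x.1 ≤ 4) := by omega
    simp [h1, h2, h3, h4, hr]

-- B's inner fold: dict = counts of the in-range labels seen, total = t + clusterScore
lemma pvInnerB (c : List (Int × Int)) (t : Int) :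
    c.foldl pvStep ((PySem.Dict.empty : PySem.Dict Int Int), t)
      = (((c.filter (fun y => 1 ≤ y.1 ∧ y.1 ≤ 4)).map Prod.fst).foldl
           (fun d y => d.insert y (d.getD y 0 + 1)) (PySem.Dict.empty : PySem.Dict Int Int),
         t + clusterScore c) := by
  induction c using List.reverseRecOn with
  | nil => simp [clusterScore, pvComb2]
  | append_singleton cs x ih =>
    rw [List.foldl_append, ih, List.foldl_cons, List.foldl_nil, clusterScore_append]
    by_cases h : 1 ≤ x.1 ∧ x.1 ≤ 4
    · have hget :
          (((cs.filter (fun y => 1 ≤ y.1 ∧ y.1 ≤ 4)).map Prod.fst).foldl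
             (fun d y => d.insert y (d.getD y 0 + 1))
             (PySem.Dict.empty : PySem.Dict Int Int)).getD x.1 0
            = (cs.countP (fun y => y.1 == x.1) : Int) := by
        rw [PySem.Dict.getD_foldl_insert_add_one]
        have hc : (cs.filter (fun y => 1 ≤ y.1 ∧ y.1 ≤ 4)).countP (fun y => y.1 == x.1)
            = cs.countP (fun y => y.1 == x.1) := by
          rw [List.countP_filter]
          apply List.countP_congr
          intro y _
          constructor
          · intro hy; exact (Bool.and_elim_left hy)
          · intro hy
            have hyx : y.1 = x.1 := by simpa using hy
            simp [hyx, h.1, h.2]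
        simp only [List.count, List.countP_map, Function.comp_def, hc]
        simp [PySem.Dict.getD, PySem.Dict.get?, PySem.Dict.empty, PySem.Dict.items]
      have hfx : List.filter (fun y => decide (1 ≤ y.1 ∧ y.1 ≤ 4)) [x] = [x] := by
        rw [List.filter_cons, if_pos (by exact decide_eq_true h), List.filter_nil]
      simp only [pvStep, if_pos h]
      rw [Prod.mk.injEq]
      constructor
      · rw [List.filter_append, hfx, List.map_append, List.foldl_append]
        simp only [List.map_cons, List.map_nil, List.foldl_cons, List.foldl_nil, hget]
      · rw [hget]; ring
    · have hfx : List.filter (fun y => decide (1 ≤ y.1 ∧ y.1 ≤ 4)) [x] = [] := by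
        rw [List.filter_cons, if_neg (by simpa using h), List.filter_nil]
      simp only [pvStep, if_neg h, List.filter_append, hfx, List.append_nil, if_neg h, add_zero]

-- B equals the mapped cluster scores
lemma portB_eq (d : List (List (Int × Int))) (k : Int) :
    TruePositives_alt d k = (d.map clusterScore).sum := by
  simp only [TruePositives_alt]
  suffices h : ∀ t : Int,
      d.foldl (fun total cluster =>
        (cluster.foldl pvStep ((PySem.Dict.empty : PySem.Dict Int Int), total)).2) t
        = t + (d.map clusterScore).sum by
    simpa using h 0
  induction d with
  | nil => intro t; simp
  | cons c cs ih =>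
    intro t
    rw [List.foldl_cons, pvInnerB, ih]
    simp only [List.map_cons, List.sum_cons]
    ring

-- ===== VERDICT (by name: the statement is the Claim_ definition above) =====
theorem TruePositives_spec : Claim_equal_TruePositives := by
  intro d k _
  unfold Spec_TruePositives
  rw [portA_eq d k, portB_eq d k]
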